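-- pv_equiv track=rewrite | github.com/EnesBrt/Dojo | my_katas/dojo_9.py | likes
-- ===== SOURCE A (Python) =====
-- def likes(names):
--     if not names or all(name.strip() == "" for name in names):
--         return "no one likes this"
--     elif len(names) == 1:
--         return f"{names[0]} likes this"
--     elif len(names) == 2:
--         return f"{names[0]} and {names[1]} likes this"
--     elif len(names) == 3:
--         return f"{names[0]}, {names[1]} and {names[2]} likes this"
--     elif len(names) >= 4:
--         remaining_length = len(names) - 2
--         return f"{names[0]}, {names[1]} and {remaining_length} others likes this"
--     elif names[n] == " ":
--         return "no one likes this"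
-- ===== SOURCE B (Python) =====
-- def likes(names):
--     if not names or all(name.strip() == "" for name in names):
--         return "no one likes this"
--     n = len(names)
--     if n > 3:
--         head, tail = names[:2], str(n - 2) + " others"
--     else:
--         head, tail = names[:-1], names[-1]
--     joined = ", ".join(head)
--     body = tail if n == 1 else joined + " and " + tail
--     return body + " likes this"
-- ===== Notes on version B (the rewrite author's own statement) =====
-- stated objective: simpler
-- what changed: Replaces A's four-way branch ladder of f-string templates by a single head/tail split (first names joined with ', ', last element or 'k others' as the tail) assembled once with join and ' and '.
import Mathlib
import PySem

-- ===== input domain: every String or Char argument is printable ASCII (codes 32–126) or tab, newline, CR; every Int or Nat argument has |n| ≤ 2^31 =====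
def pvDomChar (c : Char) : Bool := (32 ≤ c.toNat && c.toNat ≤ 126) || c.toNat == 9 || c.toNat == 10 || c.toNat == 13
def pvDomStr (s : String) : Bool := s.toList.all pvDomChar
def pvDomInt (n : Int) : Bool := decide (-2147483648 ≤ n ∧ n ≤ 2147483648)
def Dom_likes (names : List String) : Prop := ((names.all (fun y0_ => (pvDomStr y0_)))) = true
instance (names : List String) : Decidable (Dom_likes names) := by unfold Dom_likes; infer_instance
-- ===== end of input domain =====

-- B replaces A's four-way f-string branch ladder by one head/tail split assembled with ", ".join and " and " (objective: simpler).


-- ===== PORT A =====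
def likes (names : List String) : String :=
  if names = [] ∨ names.all (fun nm => PySem.Str.strip nm == "") then "no one likes this"
  else if names.length = 1 then
    PySem.List.pyGetD names 0 "" ++ " likes this"
  else if names.length = 2 then
    PySem.List.pyGetD names 0 "" ++ " and " ++ PySem.List.pyGetD names 1 "" ++ " likes this"
  else if names.length = 3 then
    PySem.List.pyGetD names 0 "" ++ ", " ++ PySem.List.pyGetD names 1 "" ++ " and " ++ PySem.List.pyGetD names 2 "" ++ " likes this"
  else if 4 ≤ names.length then
    PySem.List.pyGetD names 0 "" ++ ", " ++ PySem.List.pyGetD names 1 "" ++ " and " ++ PySem.Int.toStr ((names.length : Int) - 2) ++ " others likes this"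
  else
    -- unreachable: length 0 is caught by the first guard, so some branch above always fires
    -- (Python's trailing 'elif names[n]' is dead code); indices above are always in range in their branch
    ""

-- ===== PORT B =====
def likes_alt (names : List String) : String :=
  if names = [] ∨ names.all (fun nm => PySem.Str.strip nm == "") then "no one likes this"
  else
    let n : Int := names.length
    let ht :=
      if n > 3 then (PySem.List.slice names none (some 2), PySem.Int.toStr (n - 2) ++ " others")
      else (PySem.List.slice names none (some (-1)), PySem.List.pyGetD names (-1) "")
      -- names[-1]: names is nonempty here, so the index is always in range
    let joined := PySem.Str.join ", " ht.1
    let body := if n = 1 then ht.2 else joined ++ " and " ++ ht.2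
    body ++ " likes this"

-- ===== PRECONDITION & SPEC =====
def Spec_likes (names : List String) (out : String) : Prop := out = likes_alt names
instance (names : List String) (out : String) : Decidable (Spec_likes names out) := by unfold Spec_likes; infer_instance

-- ===== CLAIM (what is proved, stated in full; the proofs are below) =====
def Claim_equal_likes : Prop := ∀ (names : List String), Dom_likes names → Spec_likes names (likes names)

-- ===== LEMMAS AND PROOFS =====
theorem join_pair (s a b : String) : PySem.Str.join s [a, b] = a ++ s ++ b := by
  simp only [PySem.Str.join, List.map_cons, List.map_nil, PySem.Chars.join_cons_cons,
    PySem.Chars.join_singleton]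
  apply String.toList_inj.mp
  simp

theorem join_single (s a : String) : PySem.Str.join s [a] = a := by
  simp only [PySem.Str.join, List.map_cons, List.map_nil, PySem.Chars.join_singleton]
  apply String.toList_inj.mp
  simp

-- ===== VERDICT (by name: the statement is the Claim_ definition above) =====
theorem likes_spec : Claim_equal_likes := by
  intro names _
  unfold Spec_likes likes likes_alt
  by_cases hg : names = [] ∨ names.all (fun nm => PySem.Str.strip nm == "")
  · rw [if_pos hg, if_pos hg]
  · rw [if_neg hg, if_neg hg]
    match names with
    | [] => exact absurd (Or.inl rfl) hg
    | [a] =>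
      simp [PySem.List.slice_to_neg_one, PySem.List.pyGetD, PySem.List.pyGet?, PySem.List.pyIdx?]
    | [a, b] =>
      simp [PySem.List.slice_to_neg_one, join_single, PySem.List.pyGetD, PySem.List.pyGet?,
        PySem.List.pyIdx?]
    | [a, b, c] =>
      simp [PySem.List.slice_to_neg_one, join_pair, PySem.List.pyGetD, PySem.List.pyGet?,
        PySem.List.pyIdx?, String.append_assoc]
    | a :: b :: c :: d :: rest =>
      have hA1 : ¬ (a :: b :: c :: d :: rest).length = 1 := by simp
      have hA2 : ¬ (a :: b :: c :: d :: rest).length = 2 := by simp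
      have hA3 : ¬ (a :: b :: c :: d :: rest).length = 3 := by simp
      have hA4 : 4 ≤ (a :: b :: c :: d :: rest).length := by simp
      have h3 : ((a :: b :: c :: d :: rest).length : Int) > 3 := by simp; omega
      have h1 : ¬ ((a :: b :: c :: d :: rest).length : Int) = 1 := by simp; omega
      rw [if_neg hA1, if_neg hA2, if_neg hA3, if_pos hA4]
      simp [PySem.List.pyGetD, PySem.List.pyGet?, PySem.List.pyIdx?, PySem.List.slice,
        PySem.List.clampIdx]
      simp [show ¬ ((rest.length : Int) + 1 + 1 + 1 = 0) from by omega,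
        show (3 : Int) ≤ (rest.length : Int) + 1 + 1 + 1 from by omega,
        show (0 : Int) ≤ (rest.length : Int) + 1 + 1 + 1 from by omega,
        show (0 : Int) ≤ (rest.length : Int) + 1 + 1 from by omega,
        join_pair, String.append_assoc]
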